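-- pv_equiv track=rewrite | github.com/se348/A2SV-programming | 0036-valid-sudoku/0036-valid-sudoku.py | squareValidity
-- ===== SOURCE A (Python) =====
-- def squareValidity(board, curr_row, curr_col):
--     check = set()
--     for row in range(curr_row, curr_row + 3):
--         for col in range(curr_col, curr_col +3):
--             if board[row][col] == ".":
--                 continue
--             if board[row][col] in check:
--                 return False
--             check.add(board[row][col])
--
--     return True
-- ===== SOURCE B (Python) =====
-- def squareValidity(board, curr_row, curr_col):
--     for i in range(9):
--         v = board[curr_row + i // 3][curr_col + i % 3]
--         if v == ".":
--             continue
--         for j in range(i):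
--             if board[curr_row + j // 3][curr_col + j % 3] == v:
--                 return False
--     return True
-- ===== Notes on version B (the rewrite author's own statement) =====
-- stated objective: alternative
-- what changed: Replaces A's single pass that accumulates a set of seen values with an early membership test by a stateless brute-force pairwise comparison: for each flat cell index i (divmod indexing), compare the cell against every earlier cell j < i re-read from the board; no auxiliary set or accumulator is kept.
import Mathlib
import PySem

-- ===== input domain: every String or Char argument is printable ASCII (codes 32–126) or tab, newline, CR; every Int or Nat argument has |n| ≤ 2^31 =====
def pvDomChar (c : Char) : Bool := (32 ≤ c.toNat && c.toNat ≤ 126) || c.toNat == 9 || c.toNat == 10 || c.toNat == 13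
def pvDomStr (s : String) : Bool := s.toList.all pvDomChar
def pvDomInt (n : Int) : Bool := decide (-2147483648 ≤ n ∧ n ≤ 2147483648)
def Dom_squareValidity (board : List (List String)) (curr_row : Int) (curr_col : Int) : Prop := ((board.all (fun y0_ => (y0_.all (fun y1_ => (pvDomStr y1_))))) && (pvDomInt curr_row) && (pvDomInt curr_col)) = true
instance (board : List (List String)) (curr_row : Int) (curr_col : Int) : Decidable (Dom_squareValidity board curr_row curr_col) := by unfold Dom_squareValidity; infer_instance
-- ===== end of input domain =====

-- B replaces A's seen-set single pass by a stateless brute-force pairwise scan: each cell i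
-- (flat divmod indexing) is compared against every earlier cell j < i re-read from the board;
-- objective: alternative (same cost class on the fixed 3x3 window, no auxiliary set).


-- ===== PORT A =====
-- board[row][col] with Python's negative-index wrap; where Python would raise IndexError both
-- ports take the same "" default — under Pre_ no lookup both ports reach is out of range
def pvCell (board : List (List String)) (r c : Int) : String :=
  ((PySem.List.pyGet? board r).bind (fun row => PySem.List.pyGet? row c)).getD ""

-- A's double loop, flattened to the list of visited (row, col) pairs, with the early 'return False'
def pvALoop (board : List (List String)) : List (Int × Int) → PySem.Set String → Bool
  | [], _ => true
  | (r, c) :: rest, check =>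
    let v := pvCell board r c
    if v = "." then pvALoop board rest check
    else if PySem.Set.contains check v then false
    else pvALoop board rest (PySem.Set.add check v)

def squareValidity (board : List (List String)) (curr_row : Int) (curr_col : Int) : Bool :=
  pvALoop board
    ((PySem.List.pyRange curr_row (curr_row + 3) 1).flatMap (fun r =>
      (PySem.List.pyRange curr_col (curr_col + 3) 1).map (fun c => (r, c))))
    PySem.Set.empty

-- ===== PORT B =====
-- the flat-index cell Source B reads: board[curr_row + i // 3][curr_col + i % 3]
def pvBCell (board : List (List String)) (curr_row curr_col i : Int) : String :=
  pvCell board (curr_row + PySem.Int.floordiv i 3) (curr_col + PySem.Int.mod i 3)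

-- B's inner 'for j in range(i): if … == v: return False' (any = early return True)
def pvBInner (board : List (List String)) (curr_row curr_col : Int) (i : Int) (v : String) : Bool :=
  (PySem.List.pyRange 0 i 1).any (fun j => pvBCell board curr_row curr_col j == v)

-- B's outer loop over the flat indices, with the early 'return False'
def pvBLoop (board : List (List String)) (curr_row curr_col : Int) : List Int → Bool
  | [] => true
  | i :: rest =>
    let v := pvBCell board curr_row curr_col i
    if v = "." then pvBLoop board curr_row curr_col rest
    else if pvBInner board curr_row curr_col i v then false
    else pvBLoop board curr_row curr_col rest

def squareValidity_alt (board : List (List String)) (curr_row : Int) (curr_col : Int) : Bool :=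
  pvBLoop board curr_row curr_col (PySem.List.pyRange 0 9 1)

-- ===== PRECONDITION & SPEC =====
-- the nine cell lookups of the window, in visit order (none = IndexError)
def pvPreVals (board : List (List String)) (curr_row curr_col : Int) : List (Option String) :=
  ((PySem.List.pyRange curr_row (curr_row + 3) 1).flatMap (fun r =>
    (PySem.List.pyRange curr_col (curr_col + 3) 1).map (fun c => (r, c)))).map
    (fun rc => (PySem.List.pyGet? board rc.1).bind (fun row => PySem.List.pyGet? row rc.2))

-- exactly the inputs on which Python A (and B, which reads the same cells in the same order)
-- returns: either all nine cells are in range, or the in-range prefix before the first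
-- IndexError already holds a duplicate non-'.' value (early 'return False')
def Pre_squareValidity (board : List (List String)) (curr_row : Int) (curr_col : Int) : Prop :=
  (((pvPreVals board curr_row curr_col).takeWhile Option.isSome).map (fun o => o.getD "")).length = 9 ∨
  ¬ ((((pvPreVals board curr_row curr_col).takeWhile Option.isSome).map (fun o => o.getD "")).filter
      (fun v => v != ".")).Nodup
instance (board : List (List String)) (curr_row : Int) (curr_col : Int) : Decidable (Pre_squareValidity board curr_row curr_col) := by unfold Pre_squareValidity; infer_instance

def pvWitness_squareValidity : List (List String) × Int × Int :=
  ([["5", ".", "3"], [".", "7", "."], ["9", "1", "."]], 0, 0)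

def Spec_squareValidity (board : List (List String)) (curr_row : Int) (curr_col : Int) (out : Bool) : Prop := out = squareValidity_alt board curr_row curr_col
instance (board : List (List String)) (curr_row : Int) (curr_col : Int) (out : Bool) : Decidable (Spec_squareValidity board curr_row curr_col out) := by unfold Spec_squareValidity; infer_instance

-- ===== CLAIM =====
def Claim_equal_squareValidity : Prop := ∀ (board : List (List String)) (curr_row : Int) (curr_col : Int), Dom_squareValidity board curr_row curr_col → Pre_squareValidity board curr_row curr_col → Spec_squareValidity board curr_row curr_col (squareValidity board curr_row curr_col)

-- ===== LEMMAS AND PROOFS =====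

-- A's loop abstracted to the list of visited cell values
def pvAVals : List String → PySem.Set String → Bool
  | [], _ => true
  | v :: rest, check =>
    if v = "." then pvAVals rest check
    else if PySem.Set.contains check v then false
    else pvAVals rest (PySem.Set.add check v)

-- B's loop abstracted to (processed prefix, remaining suffix) of the visited cell values
def pvBVals : List String → List String → Bool
  | [], _ => true
  | v :: rest, pre =>
    if v = "." then pvBVals rest (pre ++ [v])
    else if pre.any (fun x => x == v) then false
    else pvBVals rest (pre ++ [v])

lemma pvALoop_eq_vals (board : List (List String)) (cells : List (Int × Int)) (s : PySem.Set String) :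
    pvALoop board cells s = pvAVals (cells.map (fun rc => pvCell board rc.1 rc.2)) s := by
  induction cells generalizing s with
  | nil => rfl
  | cons rc rest ih => obtain ⟨r, c⟩ := rc; simp only [pvALoop, pvAVals, List.map_cons]; split_ifs <;> simp [ih]

-- A's set of seen non-'.' values is intensionally B's processed prefix filtered to non-'.'
lemma pvAVals_eq_pvBVals (vs pre : List String) (s : PySem.Set String)
    (hinv : ∀ x, PySem.Set.contains s x = true ↔ x ∈ pre ∧ x ≠ ".") :
    pvAVals vs s = pvBVals vs pre := by
  induction vs generalizing pre s with
  | nil => rfl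
  | cons v rest ih =>
    by_cases hdot : v = "."
    · simp only [pvAVals, pvBVals, if_pos hdot]
      refine ih (pre ++ [v]) s (fun x => ?_)
      rw [hinv x]
      constructor
      · rintro ⟨hm, hne⟩; exact ⟨by simp [hm], hne⟩
      · rintro ⟨hm, hne⟩
        rcases List.mem_append.mp hm with h | h
        · exact ⟨h, hne⟩
        · exact absurd (by simpa using h) (by simpa [hdot] using hne)
    · by_cases hmem : v ∈ pre
      · have hc : PySem.Set.contains s v = true := (hinv v).mpr ⟨hmem, hdot⟩
        have hvs : v ∈ s := by simpa using hc
        have hany : pre.any (fun x => x == v) = true := by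
          simp only [List.any_eq_true, beq_iff_eq]; exact ⟨v, hmem, rfl⟩
        simp [pvAVals, pvBVals, hdot, hvs, hany]
      · have hc : PySem.Set.contains s v = false := by
          by_contra h
          exact hmem ((hinv v).mp (by simpa using h)).1
        have hany : pre.any (fun x => x == v) = false := by
          simp only [List.any_eq_false, beq_iff_eq]
          intro x hx he; exact hmem (he ▸ hx)
        simp only [pvAVals, pvBVals, if_neg hdot, hc, hany, Bool.false_eq_true, if_false]
        refine ih (pre ++ [v]) (PySem.Set.add s v) (fun x => ?_)
        constructor
        · intro hx
          have hx' : x ∈ PySem.Set.add s v := by simpa using hx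
          rcases (PySem.Set.mem_add s v x).mp hx' with h | rfl
          · have h2 := (hinv x).mp (by simpa using h)
            exact ⟨List.mem_append.mpr (Or.inl h2.1), h2.2⟩
          · exact ⟨by simp, hdot⟩
        · rintro ⟨hm, hne⟩
          rcases List.mem_append.mp hm with h | h
          · have hxs : x ∈ s := by simpa using (hinv x).mpr ⟨h, hne⟩
            simpa using (PySem.Set.mem_add s v x).mpr (Or.inl hxs)
          · simpa using (PySem.Set.mem_add s v x).mpr (Or.inr (by simpa using h))

-- the nine cells visited by A (row-major pairs) and by B (divmod of a flat index) coincide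
lemma cells_map_eq (board : List (List String)) (curr_row curr_col : Int) :
    ((PySem.List.pyRange curr_row (curr_row + 3) 1).flatMap (fun r =>
      (PySem.List.pyRange curr_col (curr_col + 3) 1).map (fun c => (r, c)))).map
        (fun rc => pvCell board rc.1 rc.2) =
    (PySem.List.pyRange 0 9 1).map (fun k => pvBCell board curr_row curr_col k) := by
  have e1 : curr_row + 1 + 1 = curr_row + 2 := by ring
  have e2 : curr_col + 1 + 1 = curr_col + 2 := by ring
  have hr : PySem.List.pyRange curr_row (curr_row + 3) 1 = [curr_row, curr_row + 1, curr_row + 2] := by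
    rw [PySem.List.pyRange_one_cons (by omega), PySem.List.pyRange_one_cons (by omega),
      PySem.List.pyRange_one_cons (by omega), PySem.List.pyRange_one_eq_nil (by omega), e1]
  have hc : PySem.List.pyRange curr_col (curr_col + 3) 1 = [curr_col, curr_col + 1, curr_col + 2] := by
    rw [PySem.List.pyRange_one_cons (by omega), PySem.List.pyRange_one_cons (by omega),
      PySem.List.pyRange_one_cons (by omega), PySem.List.pyRange_one_eq_nil (by omega), e2]
  have hk : PySem.List.pyRange 0 9 1 = [0, 1, 2, 3, 4, 5, 6, 7, 8] := by decide
  rw [hr, hc, hk]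
  simp only [List.flatMap_cons, List.flatMap_nil, List.map_cons, List.map_nil,
    List.append_nil, List.cons_append, List.nil_append, pvBCell]
  norm_num [show PySem.Int.floordiv 0 3 = 0 from by decide, show PySem.Int.mod 0 3 = 0 from by decide,
    show PySem.Int.floordiv 1 3 = 0 from by decide, show PySem.Int.mod 1 3 = 1 from by decide,
    show PySem.Int.floordiv 2 3 = 0 from by decide, show PySem.Int.mod 2 3 = 2 from by decide,
    show PySem.Int.floordiv 3 3 = 1 from by decide, show PySem.Int.mod 3 3 = 0 from by decide,
    show PySem.Int.floordiv 4 3 = 1 from by decide, show PySem.Int.mod 4 3 = 1 from by decide,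
    show PySem.Int.floordiv 5 3 = 1 from by decide, show PySem.Int.mod 5 3 = 2 from by decide,
    show PySem.Int.floordiv 6 3 = 2 from by decide, show PySem.Int.mod 6 3 = 0 from by decide,
    show PySem.Int.floordiv 7 3 = 2 from by decide, show PySem.Int.mod 7 3 = 1 from by decide,
    show PySem.Int.floordiv 8 3 = 2 from by decide, show PySem.Int.mod 8 3 = 2 from by decide]

-- B's port loop over range(n, 9), related to the abstract (prefix, suffix) loop on the value list
lemma pvBLoop_eq_vals (board : List (List String)) (curr_row curr_col : Int) (n : Nat) (hn : n ≤ 9) :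
    pvBLoop board curr_row curr_col (PySem.List.pyRange (n : Int) 9 1) =
      pvBVals (((PySem.List.pyRange 0 9 1).map (pvBCell board curr_row curr_col)).drop n)
        (((PySem.List.pyRange 0 9 1).map (pvBCell board curr_row curr_col)).take n) := by
  set w := (PySem.List.pyRange 0 9 1).map (pvBCell board curr_row curr_col) with hw
  have hwlen : w.length = 9 := by
    simp [hw, PySem.List.length_pyRange_one]
  induction h : 9 - n generalizing n with
  | zero =>
    have h9 : n = 9 := by omega
    subst h9
    rw [PySem.List.pyRange_one_eq_nil (by norm_num)]
    rw [List.drop_eq_nil_of_le (by omega)]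
    rfl
  | succ m ih =>
    have hlt : n < 9 := by omega
    rw [PySem.List.pyRange_one_cons (by exact_mod_cast hlt)]
    have hdrop : w.drop n = w[n] :: w.drop (n + 1) := List.drop_eq_getElem_cons (by omega)
    have htake : w.take (n + 1) = w.take n ++ [w[n]] := by
      rw [List.take_add_one, List.getElem?_eq_getElem (by omega)]
      rfl
    have hcell : pvBCell board curr_row curr_col (n : Int) = w[n] := by
      simp only [hw, List.getElem_map]
      congr 1
      rw [PySem.List.getElem_pyRange_one]
      ring
    have hinner : pvBInner board curr_row curr_col (n : Int) (w[n]) =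
        (w.take n).any (fun x => x == w[n]) := by
      unfold pvBInner
      have htk : (PySem.List.pyRange 0 (n : Int) 1).map (pvBCell board curr_row curr_col) = w.take n := by
        have hsplit : PySem.List.pyRange 0 9 1 =
            PySem.List.pyRange 0 (n : Int) 1 ++ PySem.List.pyRange (n : Int) 9 1 :=
          PySem.List.pyRange_one_append 0 (n : Int) 9 (by positivity) (by exact_mod_cast hn)
        have hlen : (PySem.List.pyRange 0 (n : Int) 1).length = n := by
          simp [PySem.List.length_pyRange_one]
        rw [hw, hsplit, List.map_append, List.take_left' (by simp [hlen])]
      rw [← htk, List.any_map]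
      rfl
    have hstep := ih (n + 1) (by omega) (by omega)
    rw [show ((n : Int) + 1) = ((n + 1 : Nat) : Int) from by push_cast; ring] at *
    simp only [pvBLoop, hcell, hinner, hstep, hdrop, htake, pvBVals]

-- ===== VERDICT =====
theorem squareValidity_spec : Claim_equal_squareValidity := by
  intro board curr_row curr_col _ _
  unfold Spec_squareValidity squareValidity squareValidity_alt
  rw [pvALoop_eq_vals, cells_map_eq]
  have hb := pvBLoop_eq_vals board curr_row curr_col 0 (by norm_num)
  norm_num at hb
  rw [hb]
  exact pvAVals_eq_pvBVals _ [] PySem.Set.empty (by simp [PySem.Set.empty])
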